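-- pv_equiv track=rewrite | github.com/AAMNAWAHEED/network-security | columnar_cipher.py | key_strtoint
-- ===== SOURCE A (Python) =====
-- import string
--
-- def key_strtoint(key,num_key):
--     count=0
--     atoz=string.ascii_lowercase
--     for i in range(len(atoz)):
--         for j in range(len(key)):
--             if atoz[i] == key[j]:
--                 count+=1
--                 num_key[j]=count
--
--     return num_key
-- ===== SOURCE B (Python) =====
-- def key_strtoint(key, num_key):
--     # rank-by-counting: each lowercase position gets 1 + the number of
--     # lowercase positions that are lexicographically-smaller as (char, index)
--     chars = list(enumerate(key))
--     for j, c in chars: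
--         if 'a' <= c <= 'z':
--             num_key[j] = 1 + sum(1 for k, d in chars
--                                  if 'a' <= d <= 'z' and (d, k) < (c, j))
--     return num_key
-- ===== Notes on version B (the rewrite author's own statement) =====
-- stated objective: alternative
-- what changed: Replaced the 26-pass alphabet rescan with a shared running counter by a direct per-position closed form: each lowercase position independently gets 1 + the number of lowercase positions whose (char, index) pair is lexicographically smaller.
import Mathlib
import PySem

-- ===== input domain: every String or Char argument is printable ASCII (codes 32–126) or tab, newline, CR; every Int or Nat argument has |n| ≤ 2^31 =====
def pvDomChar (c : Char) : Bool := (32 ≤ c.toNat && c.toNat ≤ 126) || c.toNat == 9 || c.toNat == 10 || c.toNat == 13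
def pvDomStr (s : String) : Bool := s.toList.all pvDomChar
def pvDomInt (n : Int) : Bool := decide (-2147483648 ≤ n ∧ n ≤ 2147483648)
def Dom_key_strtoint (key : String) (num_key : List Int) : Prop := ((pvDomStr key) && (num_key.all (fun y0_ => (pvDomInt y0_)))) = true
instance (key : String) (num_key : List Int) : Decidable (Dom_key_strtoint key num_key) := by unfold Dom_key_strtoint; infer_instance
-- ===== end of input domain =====

-- B replaces A's 26-pass alphabet rescan with a running counter by an independent per-position
-- closed-form rank (1 + number of lexicographically smaller (char, index) pairs); both Pythons
-- mutate num_key in place identically, the equivalence proved is about the returned value.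

-- ===== PORT A =====
-- 'num_key[j] = count' raises IndexError when j ≥ len(num_key); ported with List.set, which is
-- exact on the inputs admitted by Pre_key_strtoint below.
def key_strtoint (key : String) (num_key : List Int) : List Int :=
  let atoz := "abcdefghijklmnopqrstuvwxyz".toList
  (atoz.foldl
    (fun (st : Int × List Int) c =>
      (PySem.List.enumerate key.toList).foldl
        (fun (st : Int × List Int) jc =>
          if c = jc.2 then (st.1 + 1, st.2.set jc.1.toNat (st.1 + 1)) else st)
        st)
    ((0 : Int), num_key)).2

-- ===== PORT B =====
def key_strtoint_alt (key : String) (num_key : List Int) : List Int :=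
  let chars := PySem.List.enumerate key.toList
  chars.foldl
    (fun nk jc =>
      if 'a' ≤ jc.2 ∧ jc.2 ≤ 'z' then
        nk.set jc.1.toNat
          (1 + ((chars.countP (fun kd =>
              (decide ('a' ≤ kd.2) && decide (kd.2 ≤ 'z')) &&
              (decide (kd.2 < jc.2) || (kd.2 == jc.2 && decide (kd.1 < jc.1))))) : Int))
      else nk)
    num_key

-- ===== PRECONDITION & SPEC =====
-- Pre_ excludes exactly the inputs where the Python A (and B alike) raises IndexError:
-- some lowercase position of key is ≥ len(num_key).
def Pre_key_strtoint (key : String) (num_key : List Int) : Prop :=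
  ∀ jc ∈ PySem.List.enumerate key.toList, ('a' ≤ jc.2 ∧ jc.2 ≤ 'z') → jc.1 < (num_key.length : Int)
instance (key : String) (num_key : List Int) : Decidable (Pre_key_strtoint key num_key) := by
  unfold Pre_key_strtoint; infer_instance
def pvWitness_key_strtoint : String × List Int := ("cab", [0, 0, 0])

def Spec_key_strtoint (key : String) (num_key : List Int) (out : List Int) : Prop := out = key_strtoint_alt key num_key
instance (key : String) (num_key : List Int) (out : List Int) : Decidable (Spec_key_strtoint key num_key out) := by unfold Spec_key_strtoint; infer_instance

-- ===== CLAIM (what is proved, stated in full; the proofs are below) =====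
def Claim_equal_key_strtoint : Prop := ∀ (key : String) (num_key : List Int), Dom_key_strtoint key num_key → Pre_key_strtoint key num_key → Spec_key_strtoint key num_key (key_strtoint key num_key)

-- ===== LEMMAS AND PROOFS =====

-- abbreviations used only by the proofs
def pvE (key : String) : List (Int × Char) := PySem.List.enumerate key.toList
def pvLow (c : Char) : Bool := decide ('a' ≤ c) && decide (c ≤ 'z')
def pvLex (a b : Int × Char) : Bool := decide (a.2 < b.2) || (a.2 == b.2 && decide (a.1 < b.1))
def pvRank (key : String) (jc : Int × Char) : Int :=
  1 + (((pvE key).countP (fun kd => pvLow kd.2 && pvLex kd jc)) : Int)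
def pvSet (nk : List Int) (w : Nat × Int) : List Int := nk.set w.1 w.2
def pvAtoz : List Char := "abcdefghijklmnopqrstuvwxyz".toList
def pvG (key : String) (c : Char) : List (Int × Char) := (pvE key).filter (fun jc => decide (jc.2 = c))
def pvLA (key : String) : List (Int × Char) := pvAtoz.flatMap (pvG key)
def pvF (key : String) : List (Int × Char) := (pvE key).filter (fun jc => pvLow jc.2)

lemma pvMemAtoz (c : Char) : c ∈ pvAtoz ↔ ('a' ≤ c ∧ c ≤ 'z') := by
  constructor
  · intro h
    have h' : c ∈ ['a','b','c','d','e','f','g','h','i','j','k','l','m','n','o','p','q','r','s','t','u','v','w','x','y','z'] := by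
      simpa [pvAtoz] using h
    fin_cases h' <;> exact ⟨by decide, by decide⟩
  · rintro ⟨h1, h2⟩
    have hn1 : 97 ≤ c.toNat := Char.le_def.mp h1
    have hn2 : c.toNat ≤ 122 := Char.le_def.mp h2
    have hl : c ∈ ['a','b','c','d','e','f','g','h','i','j','k','l','m','n','o','p','q','r','s','t','u','v','w','x','y','z'] := by
      set n := c.toNat with hdef
      have hofn := Char.ofNat_toNat c
      rw [← hdef] at hofn
      interval_cases n <;> (rw [← hofn]; decide)
    simpa [pvAtoz] using hl

lemma pvLexAsymm (a b : Int × Char) (h : pvLex a b = true) : pvLex b a = false := by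
  rw [Bool.eq_false_iff]
  intro ht
  simp only [pvLex, Bool.or_eq_true, Bool.and_eq_true, decide_eq_true_eq, beq_iff_eq] at h ht
  rcases h with h | ⟨he, hi⟩ <;> rcases ht with t | ⟨te, ti⟩
  · exact lt_asymm h t
  · rw [te] at h; exact lt_irrefl _ h
  · rw [he] at t; exact lt_irrefl _ t
  · omega


lemma pvLexIrrefl (a : Int × Char) : pvLex a a = false := by
  simp [pvLex]

-- a foldl of in-range-distinct writes is permutation invariant
lemma pvFoldlSetPerm (W W' : List (Nat × Int)) (h : W.Perm W')
    (hnd : (W.map Prod.fst).Nodup) (nk : List Int) :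
    W.foldl pvSet nk = W'.foldl pvSet nk := by
  refine h.foldl_eq' ?_ nk
  intro x hx y hy z
  by_cases hxy : x.1 = y.1
  · have hxey : x = y := List.inj_on_of_nodup_map hnd hx hy hxy
    subst hxey; rfl
  · exact List.set_comm _ _ hxy

-- A's counter loop is the enumerate-writes loop
lemma pvFoldStep (L : List (Int × Char)) (c0 : Int) (nk : List Int) :
    L.foldl (fun (st : Int × List Int) jc => (st.1 + 1, st.2.set jc.1.toNat (st.1 + 1))) (c0, nk)
    = (c0 + L.length,
       (PySem.List.enumerate L (c0 + 1)).foldl (fun nk r => nk.set r.2.1.toNat r.1) nk) := by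
  induction L generalizing c0 nk with
  | nil => simp [PySem.List.enumerate]
  | cons jc t ih =>
    rw [List.foldl_cons, ih (c0 + 1), PySem.List.enumerate_cons, List.foldl_cons]
    refine Prod.ext ?_ rfl
    simp only [List.length_cons]
    push_cast
    ring

lemma pvFoldlFlatMap {β : Type} (l : List Char) (g : Char → List (Int × Char))
    (f : β → Int × Char → β) (init : β) :
    (l.flatMap g).foldl f init = l.foldl (fun st c => (g c).foldl f st) init := by
  induction l generalizing init with
  | nil => rfl
  | cons c t ih => rw [List.flatMap_cons, List.foldl_append, List.foldl_cons, ih]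

-- filters by disjoint predicates concatenate to the filter by the disjunction, up to permutation
lemma pvFilterOrPerm (l : List (Int × Char)) (p q : (Int × Char) → Bool)
    (h : ∀ x ∈ l, ¬(p x = true ∧ q x = true)) :
    (l.filter p ++ l.filter q).Perm (l.filter (fun x => p x || q x)) := by
  induction l with
  | nil => simp
  | cons x t ih =>
    have ht : ∀ y ∈ t, ¬(p y = true ∧ q y = true) := fun y hy => h y (List.mem_cons_of_mem _ hy)
    by_cases hp : p x = true
    · have hq : q x ≠ true := fun hq => h x List.mem_cons_self ⟨hp, hq⟩
      have hq' : q x = false := Bool.eq_false_iff.mpr hq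
      simp only [List.filter_cons, hp, hq', Bool.true_or, if_true, List.cons_append]
      exact (ih ht).cons x
    · have hp' : p x = false := Bool.eq_false_iff.mpr hp
      by_cases hq : q x = true
      · simp only [List.filter_cons, hp', hq, Bool.false_or, if_true, Bool.false_eq_true,
          if_false]
        exact List.Perm.trans List.perm_middle ((ih ht).cons x)
      · have hq' : q x = false := Bool.eq_false_iff.mpr hq
        simp only [List.filter_cons, hp', hq', Bool.false_or, Bool.false_eq_true, if_false]
        exact ih ht


lemma pvFlatMapPerm (key : String) (cs : List Char) (hnd : cs.Nodup) :
    (cs.flatMap (pvG key)).Perm ((pvE key).filter (fun jc => decide (jc.2 ∈ cs))) := by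
  induction cs with
  | nil => simp
  | cons c t ih =>
    rw [List.nodup_cons] at hnd
    rw [List.flatMap_cons]
    refine ((ih hnd.2).append_left (pvG key c)).trans ?_
    have hdis : ∀ x ∈ pvE key,
        ¬((decide (x.2 = c)) = true ∧ (decide (x.2 ∈ t)) = true) := by
      rintro x _ ⟨h1, h2⟩
      simp only [decide_eq_true_eq] at h1 h2
      exact hnd.1 (h1 ▸ h2)
    refine (pvFilterOrPerm (pvE key) _ _ hdis).trans ?_
    have hfun : (fun x : Int × Char => decide (x.2 = c) || decide (x.2 ∈ t))
        = fun x : Int × Char => decide (x.2 ∈ c :: t) := by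
      funext x
      simp [List.mem_cons]
    rw [hfun]

lemma pvPermLAF (key : String) : (pvLA key).Perm (pvF key) := by
  have h := pvFlatMapPerm key pvAtoz (by decide)
  have heq : ((pvE key).filter (fun jc => decide (jc.2 ∈ pvAtoz))) = pvF key := by
    apply List.filter_congr
    intro x _
    rw [show (decide (x.2 ∈ pvAtoz)) = decide ('a' ≤ x.2 ∧ x.2 ≤ 'z') from
      decide_eq_decide.mpr (pvMemAtoz _)]
    simp [pvLow, Bool.decide_and]
  rw [pvLA]
  exact heq ▸ h

lemma pvPairwiseLA (key : String) : (pvLA key).Pairwise (fun a b => pvLex a b = true) := by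
  have hgrp : ∀ c, (pvG key c).Pairwise (fun a b => pvLex a b = true) := by
    intro c
    have hE : (pvE key).Pairwise (fun a b => a.1 < b.1) := by
      rw [pvE]; exact PySem.List.pairwise_lt_enumerate _ _
    have hF := hE.filter (fun jc : Int × Char => decide (jc.2 = c))
    refine List.Pairwise.imp_of_mem ?_ hF
    intro a b ha hb hab
    have ha2 : a.2 = c := by simpa using List.of_mem_filter ha
    have hb2 : b.2 = c := by simpa using List.of_mem_filter hb
    simp [pvLex, ha2, hb2, hab]
  have hacross : (pvAtoz.map (pvG key)).Pairwise
      (fun l₁ l₂ => ∀ x ∈ l₁, ∀ y ∈ l₂, pvLex x y = true) := by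
    rw [List.pairwise_map]
    have hatoz : pvAtoz.Pairwise (· < ·) := by decide
    refine List.Pairwise.imp ?_ hatoz
    intro c d hcd x hx y hy
    have hx2 : x.2 = c := by simpa using List.of_mem_filter hx
    have hy2 : y.2 = d := by simpa using List.of_mem_filter hy
    simp [pvLex, hx2, hy2, hcd]
  rw [pvLA, List.flatMap_def]
  refine List.pairwise_flatten.mpr ⟨?_, hacross⟩
  intro l hl
  obtain ⟨c, _, rfl⟩ := List.mem_map.mp hl
  exact hgrp c


lemma pvCountLt (L : List (Int × Char)) (h : L.Pairwise (fun a b => pvLex a b = true))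
    (i : Nat) (hi : i < L.length) :
    L.countP (fun x => pvLex x L[i]) = i := by
  have hpw := List.pairwise_iff_getElem.mp h
  obtain ⟨a, ha⟩ : ∃ a, L[i] = a := ⟨_, rfl⟩
  rw [ha]
  conv_lhs => rw [← List.take_append_drop i L]
  rw [List.countP_append]
  have h1 : (L.take i).countP (fun x => pvLex x a) = (L.take i).length := by
    rw [List.countP_eq_length]
    intro b hb
    obtain ⟨p, hp, rfl⟩ := List.mem_take_iff_getElem.mp hb
    have hpi : p < i := lt_of_lt_of_le hp (by simp)
    rw [← ha]
    exact hpw p i (by omega) hi hpi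
  have h2 : (L.drop i).countP (fun x => pvLex x a) = 0 := by
    rw [List.countP_eq_zero]
    intro b hb
    obtain ⟨q, hq, rfl⟩ := List.mem_drop_iff_getElem.mp hb
    rcases Nat.eq_zero_or_pos q with rfl | hqpos
    · intro hc
      simp only [Nat.add_zero] at hc
      rw [ha, pvLexIrrefl] at hc
      exact Bool.false_ne_true hc
    · have hlt : pvLex L[i] L[i + q] = true := hpw i (i + q) hi (by omega) (by omega)
      rw [ha] at hlt
      have hasym := pvLexAsymm _ _ hlt
      intro hc
      rw [hasym] at hc
      exact Bool.false_ne_true hc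
  rw [h1, h2, List.length_take]
  omega


lemma pvRankAt (key : String) (i : Nat) (hi : i < (pvLA key).length) :
    pvRank key (pvLA key)[i] = 1 + (i : Int) := by
  rw [pvRank]
  have h1 : (pvE key).countP (fun kd => pvLow kd.2 && pvLex kd (pvLA key)[i])
      = (pvF key).countP (fun kd => pvLex kd (pvLA key)[i]) := by
    rw [pvF, List.countP_filter]
    apply List.countP_congr
    intro a _
    constructor <;> (intro hh; rwa [Bool.and_comm])
  have h2 : (pvF key).countP (fun kd => pvLex kd (pvLA key)[i])
      = (pvLA key).countP (fun kd => pvLex kd (pvLA key)[i]) :=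
    ((pvPermLAF key).countP_eq _).symm
  rw [h1, h2, pvCountLt _ (pvPairwiseLA key) i hi]

lemma pvEnumLA (key : String) :
    PySem.List.enumerate (pvLA key) 1 = (pvLA key).map (fun jc => (pvRank key jc, jc)) := by
  apply List.ext_getElem
  · simp [PySem.List.length_enumerate]
  · intro i h1 h2
    have hi : i < (pvLA key).length := by
      simpa [PySem.List.length_enumerate] using h1
    rw [PySem.List.getElem_enumerate _ _ i h1, List.getElem_map]
    refine Prod.ext ?_ rfl
    simp only [pvRankAt key i hi]

lemma pvA_eq (key : String) (nk : List Int) :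
    key_strtoint key nk
    = ((pvLA key).map (fun jc => (jc.1.toNat, pvRank key jc))).foldl pvSet nk := by
  have hstep :
      ("abcdefghijklmnopqrstuvwxyz".toList.foldl
        (fun (st : Int × List Int) c =>
          (PySem.List.enumerate key.toList).foldl
            (fun (st : Int × List Int) jc =>
              if c = jc.2 then (st.1 + 1, st.2.set jc.1.toNat (st.1 + 1)) else st)
            st)
        ((0 : Int), nk))
      = (pvLA key).foldl
          (fun (st : Int × List Int) jc => (st.1 + 1, st.2.set jc.1.toNat (st.1 + 1)))
          ((0 : Int), nk) := by
    rw [pvLA, pvFoldlFlatMap]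
    refine (PySem.List.foldl_congr_mem _ _ _ _ ?_)
    intro st c _
    rw [PySem.List.foldl_ite_eq_foldl_filter (p := fun jc : Int × Char => c = jc.2)]
    show List.foldl _ st ((pvE key).filter _) = _
    congr 1
    rw [pvG]
    apply List.filter_congr
    intro x _
    exact decide_eq_decide.mpr eq_comm
  show ("abcdefghijklmnopqrstuvwxyz".toList.foldl _ ((0 : Int), nk)).2 = _
  rw [hstep, pvFoldStep, show (0 : Int) + 1 = 1 from rfl, pvEnumLA, List.foldl_map,
    List.foldl_map]
  rfl

lemma pvB_eq (key : String) (nk : List Int) :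
    key_strtoint_alt key nk
    = ((pvF key).map (fun jc => (jc.1.toNat, pvRank key jc))).foldl pvSet nk := by
  show (PySem.List.enumerate key.toList).foldl _ nk = _
  rw [PySem.List.foldl_ite_eq_foldl_filter
    (p := fun jc : Int × Char => 'a' ≤ jc.2 ∧ jc.2 ≤ 'z')]
  rw [List.foldl_map]
  have hfil : (PySem.List.enumerate key.toList).filter
      (fun jc => decide ('a' ≤ jc.2 ∧ jc.2 ≤ 'z')) = pvF key := by
    rw [pvF]
    apply List.filter_congr
    intro x _
    simp [pvLow, Bool.decide_and]
  rw [hfil]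
  rfl

lemma pvNodupFst (key : String) : ((pvLA key).map (fun jc => jc.1.toNat)).Nodup := by
  have hE : (pvE key).Pairwise (fun a b => a.1 < b.1) := by
    rw [pvE]; exact PySem.List.pairwise_lt_enumerate _ _
  have hFpw : (pvF key).Pairwise (fun a b => a.1 < b.1) := hE.filter _
  have hnn : ∀ x ∈ pvF key, 0 ≤ x.1 := by
    intro x hx
    have hx' : x ∈ pvE key := List.mem_of_mem_filter hx
    rw [pvE] at hx'
    obtain ⟨k, hk, rfl⟩ := (PySem.List.mem_enumerate_iff _ _ _).mp hx'
    simp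
  have hFnat : (pvF key).Pairwise (fun a b => a.1.toNat < b.1.toNat) := by
    refine List.Pairwise.imp_of_mem ?_ hFpw
    intro a b ha hb hab
    have := hnn a ha
    omega
  have hFnd : ((pvF key).map (fun jc => jc.1.toNat)).Nodup :=
    (List.pairwise_map.mpr hFnat).imp (fun h => Nat.ne_of_lt h)
  have hperm := (pvPermLAF key).map (fun jc => jc.1.toNat)
  exact hperm.nodup_iff.mpr hFnd

-- ===== VERDICT (by name: the statement is the Claim_ definition above) =====
theorem key_strtoint_spec : Claim_equal_key_strtoint := by
  intro key num_key _ _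
  unfold Spec_key_strtoint
  rw [pvA_eq, pvB_eq]
  apply pvFoldlSetPerm
  · exact (pvPermLAF key).map _
  · have := pvNodupFst key
    simpa [List.map_map, Function.comp] using this
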